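-- pv_equiv track=rewrite | github.com/daniel-kurzynski/advent-of-code | 2024/day21.py | find_shortest_sequences_single_layer
-- ===== SOURCE A (Python) =====
-- from collections import defaultdict, deque
--
-- def find_shortest_sequences_single_layer(from_key, to_key, keypad, keypad_positions):
--     from_pos = keypad_positions[from_key]
--     to_pos = keypad_positions[to_key]
--
--     queue = deque([(from_pos, [])])
--     shortest_sequences = []
--     min_length = float('inf')
--
--     while queue:
--         pos, path = queue.popleft()
--
--         if pos == to_pos:
--             if len(path) < min_length:
--                 shortest_sequences = [path + ["A"]]
--                 min_length = len(path)
--             elif len(path) == min_length: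
--                 shortest_sequences.append(path + ["A"])
--             continue
--
--         if len(path) >= min_length:
--             continue
--
--         x, y = pos
--         moves = [
--             ((x-1, y), '^'),
--             ((x+1, y), 'v'),
--             ((x, y-1), '<'),
--             ((x, y+1), '>')
--         ]
--
--         for next_pos, direction in moves:
--             if next_pos in keypad:
--                 queue.append((next_pos, path + [direction]))
--
--     return shortest_sequences
-- ===== SOURCE B (Python) =====
-- def find_shortest_sequences_single_layer(from_key, to_key, keypad, keypad_positions):
--     from_pos = keypad_positions[from_key]
--     to_pos = keypad_positions[to_key]
--
--     frontier = [(from_pos, [])]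
--     while frontier:
--         hits = [path + ["A"] for pos, path in frontier if pos == to_pos]
--         if hits:
--             return hits
--         next_frontier = []
--         for (x, y), path in frontier:
--             for next_pos, direction in (((x-1, y), '^'), ((x+1, y), 'v'), ((x, y-1), '<'), ((x, y+1), '>')):
--                 if next_pos in keypad:
--                     next_frontier.append((next_pos, path + [direction]))
--         frontier = next_frontier
--     return []
-- ===== Notes on version B (the rewrite author's own statement) =====
-- stated objective: simpler
-- what changed: A's FIFO deque with min_length bookkeeping and per-entry pruning is replaced by level-synchronous frontier expansion: expand whole generations and return the first generation that contains the target.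
import Mathlib
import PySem

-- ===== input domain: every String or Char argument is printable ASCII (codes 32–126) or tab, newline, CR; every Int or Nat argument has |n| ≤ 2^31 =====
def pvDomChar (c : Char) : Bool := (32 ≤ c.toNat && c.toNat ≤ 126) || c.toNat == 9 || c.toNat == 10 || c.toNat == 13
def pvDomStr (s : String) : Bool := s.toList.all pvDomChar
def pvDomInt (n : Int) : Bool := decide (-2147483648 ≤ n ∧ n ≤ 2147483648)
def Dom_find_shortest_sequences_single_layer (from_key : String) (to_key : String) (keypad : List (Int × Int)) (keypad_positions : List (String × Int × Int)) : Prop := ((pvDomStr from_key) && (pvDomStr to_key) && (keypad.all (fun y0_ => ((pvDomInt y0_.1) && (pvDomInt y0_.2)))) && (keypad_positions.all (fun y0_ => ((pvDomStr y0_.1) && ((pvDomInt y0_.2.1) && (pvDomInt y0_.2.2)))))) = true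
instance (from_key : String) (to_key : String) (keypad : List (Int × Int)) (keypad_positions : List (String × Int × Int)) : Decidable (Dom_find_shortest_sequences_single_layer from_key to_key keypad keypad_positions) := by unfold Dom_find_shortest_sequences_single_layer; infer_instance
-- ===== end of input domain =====

-- B replaces A's FIFO queue with min-length bookkeeping by level-synchronous frontier
-- expansion that returns the first generation containing the target (objective: simpler).
-- Note on Python A's mutation: A only mutates its own locals; arguments are not mutated.

-- ===== PORT A =====
-- the four candidate moves from a position, in A's (and B's) order ^, v, <, >
def pvMoves (p : Int × Int) : List ((Int × Int) × String) :=
  [((p.1 - 1, p.2), "^"), ((p.1 + 1, p.2), "v"), ((p.1, p.2 - 1), "<"), ((p.1, p.2 + 1), ">")]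

-- the in-keypad children of an entry (shared by both ports: both Pythons have the
-- identical 'moves' literal and the identical membership filter)
def pvExpand (keypad : List (Int × Int)) (e : (Int × Int) × List String) :
    List ((Int × Int) × List String) :=
  (pvMoves e.1).filterMap (fun m => if m.1 ∈ keypad then some (m.1, e.2 ++ [m.2]) else none)

-- A's while-loop over the deque; fuel counts dequeues (Python has no fuel: the top-level
-- fuel 4^(|keypad|+4) is proved sufficient on Pre_; min_length = ∞ is the 'none' case.
def pvBfsA (to_pos : Int × Int) (keypad : List (Int × Int)) :
    Nat → List ((Int × Int) × List String) → List (List String) → Option Nat → List (List String)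
  | 0, _, res, _ => res
  | _ + 1, [], res, _ => res
  | fuel + 1, e :: q, res, minLen =>
    if e.1 = to_pos then
      match minLen with
      | none => pvBfsA to_pos keypad fuel q [e.2 ++ ["A"]] (some e.2.length)
      | some m =>
        if e.2.length < m then pvBfsA to_pos keypad fuel q [e.2 ++ ["A"]] (some e.2.length)
        else if e.2.length = m then pvBfsA to_pos keypad fuel q (res ++ [e.2 ++ ["A"]]) (some m)
        else pvBfsA to_pos keypad fuel q res (some m)
    else
      match minLen with
      | some m =>
        if m ≤ e.2.length then pvBfsA to_pos keypad fuel q res (some m)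
        else pvBfsA to_pos keypad fuel (q ++ pvExpand keypad e) res (some m)
      | none => pvBfsA to_pos keypad fuel (q ++ pvExpand keypad e) res none

def find_shortest_sequences_single_layer (from_key : String) (to_key : String) (keypad : List (Int × Int)) (keypad_positions : List (String × Int × Int)) : List (List String) :=
  match keypad_positions.lookup from_key, keypad_positions.lookup to_key with
  | some from_pos, some to_pos =>
      pvBfsA to_pos keypad (4 ^ (keypad.length + 4)) [(from_pos, [])] [] none
  | _, _ => []  -- Python raises KeyError here; excluded by Pre_

-- ===== PORT B =====
-- B's own copy of the move list and the child filter (same literals in Source B)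
def pvMovesB (p : Int × Int) : List ((Int × Int) × String) :=
  [((p.1 - 1, p.2), "^"), ((p.1 + 1, p.2), "v"), ((p.1, p.2 - 1), "<"), ((p.1, p.2 + 1), ">")]

def pvExpandB (keypad : List (Int × Int)) (e : (Int × Int) × List String) :
    List ((Int × Int) × List String) :=
  (pvMovesB e.1).filterMap (fun m => if m.1 ∈ keypad then some (m.1, e.2 ++ [m.2]) else none)

-- B's while-loop over whole generations; fuel counts generations (the top-level
-- fuel |keypad|+4 is proved sufficient on Pre_).
def pvLevelsB (to_pos : Int × Int) (keypad : List (Int × Int)) :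
    Nat → List ((Int × Int) × List String) → List (List String)
  | 0, _ => []
  | fuel + 1, frontier =>
    if frontier = [] then []
    else
      let hits := (frontier.filter (fun e => decide (e.1 = to_pos))).map (fun e => e.2 ++ ["A"])
      if hits = [] then pvLevelsB to_pos keypad fuel (frontier.flatMap (pvExpandB keypad))
      else hits

def find_shortest_sequences_single_layer_alt (from_key : String) (to_key : String) (keypad : List (Int × Int)) (keypad_positions : List (String × Int × Int)) : List (List String) :=
  match keypad_positions.lookup from_key with
  | none => []  -- Python raises KeyError here; excluded by Pre_
  | some from_pos =>
    match keypad_positions.lookup to_key with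
    | none => []  -- Python raises KeyError here; excluded by Pre_
    | some to_pos => pvLevelsB to_pos keypad (keypad.length + 4) [(from_pos, [])]

-- ===== PRECONDITION & SPEC =====
-- the four grid neighbours, for the precondition (same step relation as the moves lists)
def pvMovesPre (p : Int × Int) : List (Int × Int) :=
  [(p.1 - 1, p.2), (p.1 + 1, p.2), (p.1, p.2 - 1), (p.1, p.2 + 1)]

-- positions reachable from fp in at most n steps through keypad cells
def pvReach (keypad : List (Int × Int)) (fp : Int × Int) : Nat → List (Int × Int)
  | 0 => [fp]
  | n + 1 =>
      pvReach keypad fp n ++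
        (pvReach keypad fp n).flatMap
          (fun q => (pvMovesPre q).filterMap (fun m => if m ∈ keypad then some m else none))

-- no keypad neighbour of fp has a keypad neighbour: the search dies out by depth 2
def pvNoEscape (keypad : List (Int × Int)) (fp : Int × Int) : Prop :=
  ∀ c ∈ keypad, c ∈ pvMovesPre fp → ∀ c' ∈ keypad, c' ∉ pvMovesPre c

-- Pre_ excludes exactly the inputs where Python A does not return: a missing key
-- (KeyError) and the inputs where the BFS loops forever (target unreachable while some
-- reachable keypad cell still has a keypad neighbour to bounce between).
def Pre_find_shortest_sequences_single_layer (from_key : String) (to_key : String) (keypad : List (Int × Int)) (keypad_positions : List (String × Int × Int)) : Prop :=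
  (keypad_positions.lookup from_key).isSome = true ∧
  (keypad_positions.lookup to_key).isSome = true ∧
  (((keypad_positions.lookup to_key).getD (0, 0)) ∈
      pvReach keypad ((keypad_positions.lookup from_key).getD (0, 0)) (keypad.length + 1) ∨
    pvNoEscape keypad ((keypad_positions.lookup from_key).getD (0, 0)))

instance (from_key : String) (to_key : String) (keypad : List (Int × Int)) (keypad_positions : List (String × Int × Int)) : Decidable (Pre_find_shortest_sequences_single_layer from_key to_key keypad keypad_positions) := by unfold Pre_find_shortest_sequences_single_layer; unfold pvNoEscape; infer_instance

def pvWitness_find_shortest_sequences_single_layer : String × String × (List (Int × Int)) × (List (String × Int × Int)) :=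
  ("A", "A", [], [("A", (0, 0))])

def Spec_find_shortest_sequences_single_layer (from_key : String) (to_key : String) (keypad : List (Int × Int)) (keypad_positions : List (String × Int × Int)) (out : List (List String)) : Prop := out = find_shortest_sequences_single_layer_alt from_key to_key keypad keypad_positions
instance (from_key : String) (to_key : String) (keypad : List (Int × Int)) (keypad_positions : List (String × Int × Int)) (out : List (List String)) : Decidable (Spec_find_shortest_sequences_single_layer from_key to_key keypad keypad_positions out) := by unfold Spec_find_shortest_sequences_single_layer; infer_instance

-- ===== CLAIM (what is proved, stated in full; the proofs are below) =====
def Claim_equal_find_shortest_sequences_single_layer : Prop := ∀ (from_key : String) (to_key : String) (keypad : List (Int × Int)) (keypad_positions : List (String × Int × Int)), Dom_find_shortest_sequences_single_layer from_key to_key keypad keypad_positions → Pre_find_shortest_sequences_single_layer from_key to_key keypad keypad_positions → Spec_find_shortest_sequences_single_layer from_key to_key keypad keypad_positions (find_shortest_sequences_single_layer from_key to_key keypad keypad_positions)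

-- ===== LEMMAS AND PROOFS =====

-- the n-th BFS generation
def pvF (keypad : List (Int × Int)) (fp : Int × Int) : Nat → List ((Int × Int) × List String)
  | 0 => [(fp, [])]
  | n + 1 => (pvF keypad fp n).flatMap (pvExpand keypad)

-- total dequeues spent on generations 0..j-1
def pvCost (keypad : List (Int × Int)) (fp : Int × Int) : Nat → Nat
  | 0 => 0
  | j + 1 => pvCost keypad fp j + (pvF keypad fp j).length

theorem pvBfsA_nil (tp : Int × Int) (kp : List (Int × Int)) (f : Nat)
    (res : List (List String)) (m : Option Nat) : pvBfsA tp kp f [] res m = res := by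
  cases f <;> rfl

theorem pvBfsA_level (tp : Int × Int) (kp : List (Int × Int)) :
    ∀ (front acc : List ((Int × Int) × List String)) (res : List (List String)) (f : Nat),
      (∀ e ∈ front, e.1 ≠ tp) →
      pvBfsA tp kp (front.length + f) (front ++ acc) res none =
        pvBfsA tp kp f (acc ++ front.flatMap (pvExpand kp)) res none := by
  intro front
  induction front with
  | nil => intro acc res f _; simp
  | cons e front ih =>
    intro acc res f hfree
    have hne : e.1 ≠ tp := hfree e (List.mem_cons_self)
    have hlen : (e :: front).length + f = front.length + f + 1 := by simp; omega
    rw [hlen, List.cons_append, pvBfsA, if_neg hne]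
    have hq : (front ++ acc) ++ pvExpand kp e = front ++ (acc ++ pvExpand kp e) := by
      simp [List.append_assoc]
    rw [hq, ih (acc ++ pvExpand kp e) res f (fun x hx => hfree x (List.mem_cons_of_mem _ hx))]
    simp [List.flatMap_cons, List.append_assoc]

theorem pvBfsA_drain (tp : Int × Int) (kp : List (Int × Int)) :
    ∀ (q : List ((Int × Int) × List String)) (res : List (List String)) (m f : Nat),
      (∀ e ∈ q, m ≤ e.2.length) →
      pvBfsA tp kp (q.length + f) q res (some m) =
        res ++ (q.filter (fun e => decide (e.1 = tp ∧ e.2.length = m))).map (fun e => e.2 ++ ["A"]) := by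
  intro q
  induction q with
  | nil => intro res m f _; simp [pvBfsA_nil]
  | cons e q ih =>
    intro res m f hge
    have hlen : (e :: q).length + f = q.length + f + 1 := by simp; omega
    have hgeq : ∀ x ∈ q, m ≤ x.2.length := fun x hx => hge x (List.mem_cons_of_mem _ hx)
    have hgee : m ≤ e.2.length := hge e List.mem_cons_self
    rw [hlen, pvBfsA]
    by_cases he : e.1 = tp
    · rw [if_pos he]
      have hnlt : ¬ e.2.length < m := by omega
      by_cases hl : e.2.length = m
      · simp only [if_neg hnlt, if_pos hl]
        rw [ih (res ++ [e.2 ++ ["A"]]) m f hgeq]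
        simp [he, hl]
      · simp only [if_neg hnlt, if_neg hl]
        rw [ih res m f hgeq]
        simp [hl]
    · rw [if_neg he]
      simp only [if_pos hgee]
      rw [ih res m f hgeq]
      simp [he]

theorem pvBfsA_hit (tp : Int × Int) (kp : List (Int × Int)) (L : Nat) :
    ∀ (front acc : List ((Int × Int) × List String)) (f : Nat),
      (∀ e ∈ front, e.2.length = L) → (∀ e ∈ acc, L < e.2.length) →
      (∃ e ∈ front, e.1 = tp) →
      pvBfsA tp kp (front.length + acc.length + (front.flatMap (pvExpand kp)).length + f)
          (front ++ acc) [] none =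
        (front.filter (fun e => decide (e.1 = tp))).map (fun e => e.2 ++ ["A"]) := by
  intro front
  induction front with
  | nil => intro acc f _ _ hex; simp at hex
  | cons e front ih =>
    intro acc f hlenf hlena hex
    have hlene : e.2.length = L := hlenf e List.mem_cons_self
    have hlenf' : ∀ x ∈ front, x.2.length = L := fun x hx => hlenf x (List.mem_cons_of_mem _ hx)
    by_cases he : e.1 = tp
    · -- first hit: reset results, then drain
      have hfuel : (e :: front).length + acc.length + ((e :: front).flatMap (pvExpand kp)).length + f
          = (front ++ acc).length + (((e :: front).flatMap (pvExpand kp)).length + f) + 1 := by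
        simp; omega
      rw [hfuel, List.cons_append, pvBfsA, if_pos he]
      have hge : ∀ x ∈ front ++ acc, L ≤ x.2.length := by
        intro x hx
        rcases List.mem_append.mp hx with hx | hx
        · exact Nat.le_of_eq (hlenf' x hx).symm
        · exact Nat.le_of_lt (hlena x hx)
      rw [hlene, pvBfsA_drain tp kp (front ++ acc) _ L _ hge]
      have hfacc : (acc.filter (fun x => decide (x.1 = tp ∧ x.2.length = L))) = [] := by
        rw [List.filter_eq_nil_iff]
        intro x hx
        have := hlena x hx
        simp; omega
      have hffront : (front.filter (fun x => decide (x.1 = tp ∧ x.2.length = L)))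
          = front.filter (fun x => decide (x.1 = tp)) := by
        apply List.filter_congr
        intro x hx
        simp [hlenf' x hx]
      rw [List.filter_append, hfacc, hffront]
      simp [he]
    · -- not yet the hit: expand this entry and continue
      have hfuel : (e :: front).length + acc.length + ((e :: front).flatMap (pvExpand kp)).length + f
          = (front.length + (acc ++ pvExpand kp e).length + (front.flatMap (pvExpand kp)).length + f) + 1 := by
        simp [List.flatMap_cons]; omega
      rw [hfuel, List.cons_append, pvBfsA, if_neg he]
      have hq : (front ++ acc) ++ pvExpand kp e = front ++ (acc ++ pvExpand kp e) := by
        simp [List.append_assoc]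
      have hlena' : ∀ x ∈ acc ++ pvExpand kp e, L < x.2.length := by
        intro x hx
        rcases List.mem_append.mp hx with hx | hx
        · exact hlena x hx
        · simp only [pvExpand, List.mem_filterMap] at hx
          obtain ⟨mv, _, hif⟩ := hx
          split at hif
          · cases hif; simp [hlene]
          · cases hif
      have hex' : ∃ x ∈ front, x.1 = tp := by
        rcases hex with ⟨x, hx, hxe⟩
        rcases List.mem_cons.mp hx with rfl | hx
        · exact absurd hxe he
        · exact ⟨x, hx, hxe⟩
      rw [hq, ih (acc ++ pvExpand kp e) f hlenf' hlena' hex']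
      simp [he]

theorem pvF_len (kp : List (Int × Int)) (fp : Int × Int) :
    ∀ n, ∀ e ∈ pvF kp fp n, e.2.length = n := by
  intro n
  induction n with
  | zero => intro e he; simp [pvF] at he; subst he; rfl
  | succ n ih =>
    intro e he
    simp only [pvF, List.mem_flatMap] at he
    obtain ⟨a, ha, he⟩ := he
    simp only [pvExpand, List.mem_filterMap] at he
    obtain ⟨mv, _, hmv⟩ := he
    split at hmv
    · cases hmv; simp [ih a ha]
    · cases hmv

theorem pvExpand_len (kp : List (Int × Int)) (e : (Int × Int) × List String) :
    (pvExpand kp e).length ≤ 4 := by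
  have h := List.length_filterMap_le
    (fun m => if m.1 ∈ kp then some (m.1, e.2 ++ [m.2]) else none) (pvMoves e.1)
  simpa [pvExpand, pvMoves] using h

theorem pvFlat_len (kp : List (Int × Int)) :
    ∀ l : List ((Int × Int) × List String), (l.flatMap (pvExpand kp)).length ≤ 4 * l.length := by
  intro l
  induction l with
  | nil => simp
  | cons e l ih =>
    have := pvExpand_len kp e
    simp only [List.flatMap_cons, List.length_append, List.length_cons]
    omega

theorem pvF_size (kp : List (Int × Int)) (fp : Int × Int) :
    ∀ n, (pvF kp fp n).length ≤ 4 ^ n := by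
  intro n
  induction n with
  | zero => simp [pvF]
  | succ n ih =>
    have h1 := pvFlat_len kp (pvF kp fp n)
    have h2 : 4 * (pvF kp fp n).length ≤ 4 * 4 ^ n := by omega
    calc (pvF kp fp (n + 1)).length ≤ 4 * (pvF kp fp n).length := h1
      _ ≤ 4 * 4 ^ n := h2
      _ = 4 ^ (n + 1) := by rw [pow_succ]; ring

theorem pvCost_le (kp : List (Int × Int)) (fp : Int × Int) :
    ∀ j, pvCost kp fp j ≤ 4 ^ j := by
  intro j
  induction j with
  | zero => simp [pvCost]
  | succ j ih =>
    have h1 := pvF_size kp fp j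
    have h2 : 4 ^ j + 4 ^ j ≤ 4 ^ (j + 1) := by
      rw [pow_succ]; omega
    simp only [pvCost]
    omega

theorem pvBfsA_chain (tp : Int × Int) (kp : List (Int × Int)) (fp : Int × Int) :
    ∀ (j f : Nat), (∀ k < j, ∀ e ∈ pvF kp fp k, e.1 ≠ tp) →
      pvBfsA tp kp (pvCost kp fp j + f) (pvF kp fp 0) [] none =
        pvBfsA tp kp f (pvF kp fp j) [] none := by
  intro j
  induction j with
  | zero => intro f _; simp [pvCost]
  | succ j ih =>
    intro f hfree
    have h1 : pvCost kp fp (j + 1) + f = pvCost kp fp j + ((pvF kp fp j).length + f) := by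
      simp [pvCost]; omega
    rw [h1, ih _ (fun k hk => hfree k (by omega))]
    have h2 := pvBfsA_level tp kp (pvF kp fp j) [] [] f (hfree j (by omega))
    simpa [pvF] using h2

theorem pvLevelsB_chain (tp : Int × Int) (kp : List (Int × Int)) (fp : Int × Int) :
    ∀ (j f : Nat), (∀ k < j, (∀ e ∈ pvF kp fp k, e.1 ≠ tp) ∧ pvF kp fp k ≠ []) →
      pvLevelsB tp kp (j + f) (pvF kp fp 0) = pvLevelsB tp kp f (pvF kp fp j) := by
  intro j
  induction j with
  | zero => intro f _; simp
  | succ j ih =>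
    intro f hyp
    have h1 : j + 1 + f = j + (f + 1) := by omega
    rw [h1, ih _ (fun k hk => hyp k (by omega))]
    obtain ⟨hfree, hne⟩ := hyp j (by omega)
    have hfil : (pvF kp fp j).filter (fun e => decide (e.1 = tp)) = [] := by
      rw [List.filter_eq_nil_iff]
      intro e he
      simpa using hfree e he
    rw [pvLevelsB, if_neg hne]
    simp only [hfil, List.map_nil]
    rfl

theorem pvMovesPre_eq (q : Int × Int) : pvMovesPre q = (pvMoves q).map Prod.fst := rfl

theorem pvReach_hit (kp : List (Int × Int)) (fp : Int × Int) :
    ∀ n, ∀ p ∈ pvReach kp fp n, ∃ m ≤ n, ∃ path, (p, path) ∈ pvF kp fp m := by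
  intro n
  induction n with
  | zero =>
    intro p hp
    simp only [pvReach, List.mem_singleton] at hp
    exact ⟨0, Nat.le_refl 0, [], by simp [hp, pvF]⟩
  | succ n ih =>
    intro p hp
    simp only [pvReach, List.mem_append] at hp
    rcases hp with hp | hp
    · obtain ⟨m, hm, path, hmem⟩ := ih p hp
      exact ⟨m, Nat.le_succ_of_le hm, path, hmem⟩
    · simp only [List.mem_flatMap, List.mem_filterMap] at hp
      obtain ⟨q, hq, mv, hmv, hif⟩ := hp
      have hpk : mv ∈ kp ∧ mv = p := by
        by_cases hc : mv ∈ kp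
        · rw [if_pos hc] at hif; cases hif; exact ⟨hc, rfl⟩
        · rw [if_neg hc] at hif; cases hif
      rw [pvMovesPre_eq] at hmv
      obtain ⟨mv', hmv', hfst⟩ := List.mem_map.mp hmv
      obtain ⟨m, hm, path, hmem⟩ := ih q hq
      refine ⟨m + 1, by omega, path ++ [mv'.2], ?_⟩
      simp only [pvF, List.mem_flatMap]
      refine ⟨(q, path), hmem, ?_⟩
      simp only [pvExpand, List.mem_filterMap]
      exact ⟨mv', hmv', by rw [hfst, if_pos hpk.1, hpk.2]⟩

theorem pvNoEscape_F2 (kp : List (Int × Int)) (fp : Int × Int)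
    (h : pvNoEscape kp fp) : pvF kp fp 2 = [] := by
  have h1 : ∀ e ∈ pvF kp fp 1, pvExpand kp e = [] := by
    intro e he
    simp only [pvF, List.flatMap_cons, List.flatMap_nil, List.append_nil] at he
    simp only [pvExpand, List.mem_filterMap] at he
    obtain ⟨mv, hmv, hif⟩ := he
    split at hif
    case isFalse => cases hif
    case isTrue hmem =>
      cases hif
      rw [pvExpand, List.filterMap_eq_nil_iff]
      intro mv' hmv'
      have hnot : mv'.1 ∉ kp := fun hin =>
        h mv.1 hmem (by rw [pvMovesPre_eq]; exact List.mem_map.mpr ⟨mv, hmv, rfl⟩) mv'.1 hin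
          (by rw [pvMovesPre_eq]; exact List.mem_map.mpr ⟨mv', hmv', rfl⟩)
      rw [if_neg hnot]
  simp only [pvF] at *
  rw [List.flatMap_eq_nil_iff]
  exact h1

-- A and B agree whenever the search terminates: main assembly lemma
theorem pv_main (tp : Int × Int) (kp : List (Int × Int)) (fp : Int × Int)
    (hterm : ∃ n ≤ kp.length + 2,
      (∃ e ∈ pvF kp fp n, e.1 = tp) ∨ pvF kp fp n = []) :
    pvBfsA tp kp (4 ^ (kp.length + 4)) [(fp, [])] [] none =
      pvLevelsB tp kp (kp.length + 4) [(fp, [])] := by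
  classical
  obtain ⟨n, hn, hPn⟩ := hterm
  have hEx : ∃ n, (∃ e ∈ pvF kp fp n, e.1 = tp) ∨ pvF kp fp n = [] := ⟨n, hPn⟩
  set n₀ := Nat.find hEx with hn₀
  have h0 := Nat.find_spec hEx
  have hb : n₀ ≤ kp.length + 2 := le_trans (Nat.find_min' hEx hPn) hn
  have hmin : ∀ k < n₀, (∀ e ∈ pvF kp fp k, e.1 ≠ tp) ∧ pvF kp fp k ≠ [] := by
    intro k hk
    have := Nat.find_min hEx hk
    push Not at this
    exact this
  have hF0 : pvF kp fp 0 = [(fp, [])] := rfl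
  by_cases hhit : ∃ e ∈ pvF kp fp n₀, e.1 = tp
  · -- the target level: both return its hits
    obtain ⟨ew, hew, hewt⟩ := hhit
    -- A side
    have hT : pvCost kp fp n₀ + ((pvF kp fp n₀).length + (((pvF kp fp n₀).flatMap (pvExpand kp)).length)) ≤ 4 ^ (kp.length + 4) := by
      have h1 := pvCost_le kp fp n₀
      have h2 := pvF_size kp fp n₀
      have h3 := pvFlat_len kp (pvF kp fp n₀)
      have h4 : (4:ℕ) ^ n₀ + (4 ^ n₀ + 4 * 4 ^ n₀) ≤ 4 ^ (n₀ + 2) := by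
        have : (4:ℕ) ^ (n₀ + 2) = 16 * 4 ^ n₀ := by ring
        omega
      have h5 : (4:ℕ) ^ (n₀ + 2) ≤ 4 ^ (kp.length + 4) :=
        Nat.pow_le_pow_right (by omega) (by omega)
      omega
    obtain ⟨sl, hsl⟩ := Nat.le.dest hT
    have hA : pvBfsA tp kp (4 ^ (kp.length + 4)) [(fp, [])] [] none =
        (( pvF kp fp n₀).filter (fun e => decide (e.1 = tp))).map (fun e => e.2 ++ ["A"]) := by
      rw [← hsl, ← hF0]
      have hchain := pvBfsA_chain tp kp fp n₀
        ((pvF kp fp n₀).length + ((pvF kp fp n₀).flatMap (pvExpand kp)).length + sl)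
        (fun k hk => (hmin k hk).1)
      rw [show pvCost kp fp n₀ + ((pvF kp fp n₀).length + ((pvF kp fp n₀).flatMap (pvExpand kp)).length) + sl
            = pvCost kp fp n₀ + ((pvF kp fp n₀).length + ((pvF kp fp n₀).flatMap (pvExpand kp)).length + sl) from by omega]
      rw [hchain]
      have hhit' := pvBfsA_hit tp kp n₀ (pvF kp fp n₀) [] sl (pvF_len kp fp n₀)
        (by intro x hx; simp at hx) ⟨ew, hew, hewt⟩
      simpa using hhit'
    -- B side
    obtain ⟨sb, hsb⟩ : ∃ s, kp.length + 4 = n₀ + (s + 1) := ⟨kp.length + 3 - n₀, by omega⟩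
    have hB : pvLevelsB tp kp (kp.length + 4) [(fp, [])] =
        ((pvF kp fp n₀).filter (fun e => decide (e.1 = tp))).map (fun e => e.2 ++ ["A"]) := by
      rw [hsb, ← hF0, pvLevelsB_chain tp kp fp n₀ (sb + 1) hmin]
      have hne : pvF kp fp n₀ ≠ [] := List.ne_nil_of_mem hew
      rw [pvLevelsB, if_neg hne]
      have hmne : ((pvF kp fp n₀).filter (fun e => decide (e.1 = tp))).map (fun e => e.2 ++ ["A"]) ≠ [] := by
        simp only [ne_eq, List.map_eq_nil_iff, List.filter_eq_nil_iff]
        push Not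
        exact ⟨ew, hew, by simp [hewt]⟩
      simp only [if_neg hmne]
    rw [hA, hB]
  · -- the frontier died out: both return []
    have hnil : pvF kp fp n₀ = [] := h0.resolve_left hhit
    have hT : pvCost kp fp n₀ ≤ 4 ^ (kp.length + 4) :=
      le_trans (pvCost_le kp fp n₀) (Nat.pow_le_pow_right (by omega) (by omega))
    obtain ⟨sl, hsl⟩ := Nat.le.dest hT
    have hA : pvBfsA tp kp (4 ^ (kp.length + 4)) [(fp, [])] [] none = [] := by
      rw [← hsl, ← hF0, pvBfsA_chain tp kp fp n₀ sl (fun k hk => (hmin k hk).1), hnil,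
        pvBfsA_nil]
    obtain ⟨sb, hsb⟩ : ∃ s, kp.length + 4 = n₀ + (s + 1) := ⟨kp.length + 3 - n₀, by omega⟩
    have hB : pvLevelsB tp kp (kp.length + 4) [(fp, [])] = [] := by
      rw [hsb, ← hF0, pvLevelsB_chain tp kp fp n₀ (sb + 1) hmin, hnil, pvLevelsB,
        if_pos rfl]
    rw [hA, hB]

-- ===== VERDICT (by name: the statement is the Claim_ definition above) =====
theorem find_shortest_sequences_single_layer_spec : Claim_equal_find_shortest_sequences_single_layer := by
  intro from_key to_key keypad keypad_positions _ hpre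
  obtain ⟨hf, ht, hcond⟩ := hpre
  obtain ⟨fp, hfp⟩ := Option.isSome_iff_exists.mp hf
  obtain ⟨tp, htp⟩ := Option.isSome_iff_exists.mp ht
  rw [hfp, htp] at hcond
  simp only [Option.getD_some] at hcond
  unfold Spec_find_shortest_sequences_single_layer
  unfold find_shortest_sequences_single_layer find_shortest_sequences_single_layer_alt
  rw [hfp, htp]
  apply pv_main
  rcases hcond with hreach | hesc
  · obtain ⟨m, hm, path, hmem⟩ := pvReach_hit keypad fp (keypad.length + 1) tp hreach
    exact ⟨m, by omega, Or.inl ⟨(tp, path), hmem, rfl⟩⟩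
  · exact ⟨2, by omega, Or.inr (pvNoEscape_F2 keypad fp hesc)⟩
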